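-- pv_equiv track=rewrite | github.com/JVRC03/LeetCode | 3912-valid-elements-in-an-array/3912-valid-elements-in-an-array.py | findValidElements
-- ===== SOURCE A (Python) =====
-- def findValidElements(nums: list[int]) -> list[int]:
--     if len(nums) < 3:
--         return nums
--
--     jvrc = []
--     jvrc.append(nums[0])
--     curr = nums[0]
--
--     p_sum = [nums[-1]]
--     jim = nums[-1]
--     for i in range(len(nums)-2, -1, -1):
--         p_sum.append(jim)
--
--         jim = max(jim, nums[i])
--
--     p_sum = p_sum[::-1]
--     idx = -1
--
--     for i in range(1, len(nums)):
--         if nums[i] > curr or nums[i] > p_sum[i]: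
--             jvrc.append(nums[i])
--             idx = i
--
--         curr = max(curr, nums[i])
--
--     if idx != len(nums)-1:
--         jvrc.append(nums[-1])
--
--     return jvrc
-- ===== SOURCE B (Python) =====
-- def findValidElements(nums: list[int]) -> list[int]:
--     if len(nums) < 3:
--         return nums
--     n = len(nums)
--     stack = []   # indices, values strictly decreasing bottom->top; bottom is the running max
--     lrecs = []   # indices of strict prefix records
--     for i, x in enumerate(nums):
--         if not stack or x > nums[stack[0]]:
--             lrecs.append(i)
--         while stack and nums[stack[-1]] <= x:
--             stack.pop()
--         stack.append(i)
--     # survivors of the stack are exactly the strict suffix records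
--     keep = {0, n - 1, *lrecs, *stack}
--     return [nums[i] for i in range(n) if i in keep]
-- ===== Notes on version B (the rewrite author's own statement) =====
-- stated objective: alternative
-- what changed: Replaces A's backward suffix-max table, running-max variable and idx/trailing-append fixup with a single forward pass over a monotonic stack whose survivors are the strict suffix records (prefix records are read against the stack bottom), then filters indices through that set.
import Mathlib
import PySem

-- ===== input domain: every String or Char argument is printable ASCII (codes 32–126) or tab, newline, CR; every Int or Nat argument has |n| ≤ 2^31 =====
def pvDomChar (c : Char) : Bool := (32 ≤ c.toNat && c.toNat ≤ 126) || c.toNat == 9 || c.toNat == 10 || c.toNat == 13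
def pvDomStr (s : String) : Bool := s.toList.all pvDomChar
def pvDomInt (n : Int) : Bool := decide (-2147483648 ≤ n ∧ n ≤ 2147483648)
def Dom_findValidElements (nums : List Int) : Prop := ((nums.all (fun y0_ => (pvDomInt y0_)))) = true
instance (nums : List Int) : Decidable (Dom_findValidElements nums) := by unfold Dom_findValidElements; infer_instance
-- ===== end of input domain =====

-- B replaces A's suffix-max table, running-max variable and idx/trailing-append fixup with a single
-- forward pass over a monotonic stack: survivors are the strict suffix records, a prefix-record list
-- is collected against the stack bottom, and the output is filtered through that index set (objective: alternative).

-- ===== PORT A =====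
def findValidElements (nums : List Int) : List Int :=
  if nums.length < 3 then nums
  else
    let jvrc : List Int := []
    let jvrc := jvrc ++ [PySem.List.pyGetD nums 0 0]
    let curr : Int := PySem.List.pyGetD nums 0 0
    let p_sum : List Int := [PySem.List.pyGetD nums (-1) 0]
    let jim : Int := PySem.List.pyGetD nums (-1) 0
    let st1 := (PySem.List.pyRange ((nums.length : Int) - 2) (-1) (-1)).foldl
      (fun (st : List Int × Int) i =>
        (st.1 ++ [st.2], max st.2 (PySem.List.pyGetD nums i 0)))
      (p_sum, jim)
    let p_sum := st1.1.reverse   -- p_sum[::-1]; exact per PySem.List.slice?_none_none_neg_one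
    let st2 := (PySem.List.pyRange 1 (nums.length : Int) 1).foldl
      (fun (st : List Int × Int × Int) i =>
        if PySem.List.pyGetD nums i 0 > st.2.2 ∨
           PySem.List.pyGetD nums i 0 > PySem.List.pyGetD p_sum i 0
        then (st.1 ++ [PySem.List.pyGetD nums i 0], i, max st.2.2 (PySem.List.pyGetD nums i 0))
        else (st.1, st.2.1, max st.2.2 (PySem.List.pyGetD nums i 0)))
      (jvrc, (-1 : Int), curr)
    let jvrc := st2.1
    let idx := st2.2.1
    if idx ≠ (nums.length : Int) - 1 then jvrc ++ [PySem.List.pyGetD nums (-1) 0]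
    else jvrc

-- ===== PORT B =====
-- the inner 'while stack and nums[stack[-1]] <= x: stack.pop()' loop (stack stored top-first)
def pvPopWhile (nums : List Int) (x : Int) : List Int → List Int
  | [] => []
  | j :: rest => if PySem.List.pyGetD nums j 0 ≤ x then pvPopWhile nums x rest else j :: rest

def findValidElements_alt (nums : List Int) : List Int :=
  if nums.length < 3 then nums
  else
    let n : Int := nums.length
    -- one forward pass: (lrecs, stack); the stack holds indices top-first (Python's list end = head)
    let st := (PySem.List.enumerate nums).foldl
      (fun (st : List Int × List Int) (p : Int × Int) =>
        ((match st.2.getLast? with       -- stack[0], the bottom ('not stack or x > nums[stack[0]]')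
          | none => st.1 ++ [p.1]
          | some b => if PySem.List.pyGetD nums b 0 < p.2 then st.1 ++ [p.1] else st.1),
         p.1 :: pvPopWhile nums p.2 st.2))
      ([], [])
    let keep := PySem.Set.ofList ([0, n - 1] ++ st.1 ++ st.2.reverse)   -- {0, n-1, *lrecs, *stack}
    (PySem.List.pyRange 0 n 1).foldl
      (fun acc i => if PySem.Set.contains keep i then acc ++ [PySem.List.pyGetD nums i 0] else acc)
      []

-- ===== PRECONDITION & SPEC =====
def Spec_findValidElements (nums : List Int) (out : List Int) : Prop := out = findValidElements_alt nums
instance (nums : List Int) (out : List Int) : Decidable (Spec_findValidElements nums out) := by unfold Spec_findValidElements; infer_instance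

-- ===== CLAIM (what is proved, stated in full; the proofs are below) =====
def Claim_equal_findValidElements : Prop := ∀ (nums : List Int), Dom_findValidElements nums → Spec_findValidElements nums (findValidElements nums)

-- ===== LEMMAS AND PROOFS =====

-- max of a nonempty list (0 on [])
def pvMaxOf (l : List Int) : Int := match l with | [] => 0 | x :: xs => xs.foldl max x
-- max of nums[0..i]
def pvPmax (nums : List Int) (i : Nat) : Int := pvMaxOf (nums.take (i+1))
-- max of nums[j..]
def pvSmax (nums : List Int) (j : Nat) : Int := pvMaxOf (nums.drop j)
-- keep condition for a middle index i (1 ≤ i ≤ n-2); at i = n-1 the second disjunct is reflexive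
def pvCond (nums : List Int) (i : Nat) : Bool :=
  decide (nums.getD i 0 > pvPmax nums (i-1)) ||
  decide (nums.getD i 0 > pvSmax nums (min (i+1) (nums.length - 1)))
-- the filtered middle part, indices 1..m
def pvMid (nums : List Int) (m : Nat) : List Int :=
  (List.range m).filterMap (fun k => if pvCond nums (k+1) then some (nums.getD (k+1) 0) else none)
-- the idx variable of A's second loop after m iterations
def pvIdxF (nums : List Int) : Nat → Int
  | 0 => -1
  | (m+1) => if pvCond nums (m+1) then ((m+1 : Nat) : Int) else pvIdxF nums m

-- B-side spec: i is a strict prefix record / j is a strict record of the length-m prefix read rightwards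
def pvLR (nums : List Int) (i : Nat) : Bool := (nums.take i).all (fun y => decide (y < nums.getD i 0))
def pvRR (nums : List Int) (m j : Nat) : Bool :=
  ((nums.take m).drop (j+1)).all (fun y => decide (y < nums.getD j 0))
-- the stack contents (bottom → top) after the first m elements were processed
def pvStack (nums : List Int) (m : Nat) : List Nat := (List.range m).filter (pvRR nums m)

theorem pv_foldl_max_comm (l : List Int) : ∀ (d x : Int), l.foldl max (max d x) = max x (l.foldl max d) := by
  induction l with
  | nil => intro d x; simp [List.foldl, max_comm]
  | cons y ys ih =>
    intro d x
    simp only [List.foldl]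
    rw [show max (max d x) y = max (max d y) x by rw [max_assoc, max_comm x y, ← max_assoc], ih]

theorem pv_maxOf_cons (x : Int) (l : List Int) (h : l ≠ []) :
    pvMaxOf (x :: l) = max x (pvMaxOf l) := by
  match l with
  | [] => exact absurd rfl h
  | y :: ys =>
    show List.foldl max x (y :: ys) = max x (List.foldl max y ys)
    simp only [List.foldl]
    rw [max_comm x y, pv_foldl_max_comm]

theorem pv_maxOf_append (l : List Int) (y : Int) (h : l ≠ []) :
    pvMaxOf (l ++ [y]) = max (pvMaxOf l) y := by
  match l with
  | [] => exact absurd rfl h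
  | x :: xs => simp [pvMaxOf, List.foldl_append]

theorem pv_pmax_zero (nums : List Int) (h : nums ≠ []) : pvPmax nums 0 = nums.getD 0 0 := by
  match nums with
  | x :: xs => simp [pvPmax, pvMaxOf]

theorem pv_pmax_succ (nums : List Int) (i : Nat) (h : i + 1 < nums.length) :
    pvPmax nums (i+1) = max (pvPmax nums i) (nums.getD (i+1) 0) := by
  have hne : nums.take (i+1) ≠ [] := by
    intro hc
    have h2 : (nums.take (i+1)).length = 0 := by rw [hc]; rfl
    rw [List.length_take] at h2
    omega
  unfold pvPmax
  rw [List.take_add_one, List.getElem?_eq_getElem h]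
  simp only [Option.toList_some]
  rw [pv_maxOf_append _ _ hne]
  congr 1
  rw [List.getD_eq_getElem?_getD, List.getElem?_eq_getElem h]
  rfl

theorem pv_smax_last (nums : List Int) (h : nums ≠ []) :
    pvSmax nums (nums.length - 1) = nums.getD (nums.length - 1) 0 := by
  have hl : nums.length - 1 < nums.length := by
    cases nums with | nil => exact absurd rfl h | cons a l => simp
  unfold pvSmax
  rw [List.drop_eq_getElem_cons hl, List.drop_of_length_le (by omega)]
  rw [List.getD_eq_getElem?_getD, List.getElem?_eq_getElem hl]
  rfl

theorem pv_smax_rec (nums : List Int) (j : Nat) (h : j + 1 < nums.length) :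
    pvSmax nums j = max (nums.getD j 0) (pvSmax nums (j+1)) := by
  have hj : j < nums.length := by omega
  have hne : nums.drop (j+1) ≠ [] := by
    intro hc; have := congrArg List.length hc; simp at this; omega
  unfold pvSmax
  rw [List.drop_eq_getElem_cons hj, pv_maxOf_cons _ _ hne]
  congr 1
  rw [List.getD_eq_getElem?_getD, List.getElem?_eq_getElem hj]
  rfl

theorem pv_reverse_map_range {α : Type} (f : Nat → α) (m : Nat) :
    (List.map f (List.range m)).reverse = (List.range m).map (fun k => f (m - 1 - k)) := by
  rw [← List.map_reverse, List.range_eq_range', List.reverse_range']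
  simp only [List.map_map, Nat.zero_add]
  rw [← List.range_eq_range']
  rfl

theorem pv_idxF_le (nums : List Int) (m : Nat) : pvIdxF nums m ≤ (m : Int) := by
  induction m with
  | zero => simp [pvIdxF]
  | succ m ih =>
    simp only [pvIdxF]
    split
    · omega
    · push_cast; omega

-- A's first loop invariant
theorem pv_loopA1 (nums : List Int) (h : 3 ≤ nums.length) (m : Nat) (hm : m ≤ nums.length - 1) :
    ((List.range m).map (fun (k : Nat) => ((nums.length : Int) - 2 - (k : Int)))).foldl
      (fun (st : List Int × Int) i =>
        (st.1 ++ [st.2], max st.2 (PySem.List.pyGetD nums i 0)))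
      ([nums.getD (nums.length - 1) 0], nums.getD (nums.length - 1) 0)
    = ([nums.getD (nums.length - 1) 0] ++ (List.range m).map (fun k => pvSmax nums (nums.length - 1 - k)),
       pvSmax nums (nums.length - 1 - m)) := by
  induction m with
  | zero =>
    simp [pv_smax_last nums (by intro hc; rw [hc] at h; simp at h)]
  | succ m ih =>
    rw [List.range_succ, List.map_append, List.foldl_append, ih (by omega)]
    simp only [List.map_cons, List.map_nil, List.foldl_cons, List.foldl_nil]
    have hcast : (nums.length : Int) - 2 - (m : Int) = ((nums.length - 2 - m : Nat) : Int) := by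
      push_cast [Nat.cast_sub (by omega : m ≤ nums.length - 2), Nat.cast_sub (by omega : 2 ≤ nums.length)]
      omega
    rw [hcast, PySem.List.pyGetD_natCast, Prod.mk.injEq]
    constructor
    · rw [List.map_append]
      simp
    · rw [show nums.length - 1 - (m + 1) = nums.length - 2 - m by omega,
          pv_smax_rec nums (nums.length - 2 - m) (by omega),
          show nums.length - 2 - m + 1 = nums.length - 1 - m by omega, max_comm]

-- A's reversed p_sum
theorem pv_psum_rev (nums : List Int) (h : 3 ≤ nums.length) :
    (([nums.getD (nums.length - 1) 0] ++
        (List.range (nums.length - 1)).map (fun k => pvSmax nums (nums.length - 1 - k))).reverse)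
    = (List.range (nums.length - 1)).map (fun k => pvSmax nums (k+1)) ++ [nums.getD (nums.length - 1) 0] := by
  rw [List.reverse_append, pv_reverse_map_range]
  simp only [List.reverse_cons, List.reverse_nil, List.nil_append]
  congr 1
  apply List.map_congr_left
  intro k hk
  rw [List.mem_range] at hk
  congr 1
  omega

-- indexing the reversed p_sum at positions 1..n-1
theorem pv_psum_get (nums : List Int) (h : 3 ≤ nums.length) (i : Nat) (h1 : 1 ≤ i) (h2 : i ≤ nums.length - 1) :
    PySem.List.pyGetD
      ((List.range (nums.length - 1)).map (fun k => pvSmax nums (k+1)) ++ [nums.getD (nums.length - 1) 0])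
      (i : Int) 0
    = pvSmax nums (min (i+1) (nums.length - 1)) := by
  rw [PySem.List.pyGetD_natCast]
  by_cases hc : i ≤ nums.length - 2
  · rw [List.getD_append _ _ _ _ (by simp; omega)]
    rw [List.getD_eq_getElem?_getD, List.getElem?_map, List.getElem?_range (by omega)]
    rw [show min (i+1) (nums.length - 1) = i + 1 by omega]
    rfl
  · have hi : i = nums.length - 1 := by omega
    subst hi
    rw [List.getD_append_right _ _ _ _ (by simp)]
    simp only [List.length_map, List.length_range, Nat.sub_self]
    rw [show min (nums.length - 1 + 1) (nums.length - 1) = nums.length - 1 by omega,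
        pv_smax_last nums (by intro hc2; rw [hc2] at h; simp at h)]
    rfl

-- nums[-1] is nums.getD (n-1)
theorem pv_last (nums : List Int) (h : nums ≠ []) :
    PySem.List.pyGetD nums (-1) 0 = nums.getD (nums.length - 1) 0 := by
  rw [PySem.List.pyGetD_neg_one nums 0 h, List.getLast_eq_getElem,
      List.getD_eq_getElem?_getD,
      List.getElem?_eq_getElem (by cases nums with | nil => exact absurd rfl h | cons a l => simp)]
  rfl

-- one more middle index
theorem pv_mid_succ (nums : List Int) (m : Nat) :
    pvMid nums (m+1)
      = pvMid nums m ++ (if pvCond nums (m+1) then [nums.getD (m+1) 0] else []) := by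
  unfold pvMid
  rw [List.range_succ, List.filterMap_append]
  congr 1
  by_cases hb : pvCond nums (m+1) = true <;> simp [hb]

-- A's second loop invariant
theorem pv_loopA2 (nums : List Int) (h : 3 ≤ nums.length) (m : Nat) (hm : m ≤ nums.length - 1) :
    ((List.range m).map (fun (k : Nat) => (1 : Int) + (k : Int))).foldl
      (fun (st : List Int × Int × Int) i =>
        if PySem.List.pyGetD nums i 0 > st.2.2 ∨
           PySem.List.pyGetD nums i 0 >
             PySem.List.pyGetD
               ((List.range (nums.length - 1)).map (fun k => pvSmax nums (k+1)) ++
                 [nums.getD (nums.length - 1) 0]) i 0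
        then (st.1 ++ [PySem.List.pyGetD nums i 0], i, max st.2.2 (PySem.List.pyGetD nums i 0))
        else (st.1, st.2.1, max st.2.2 (PySem.List.pyGetD nums i 0)))
      ([nums.getD 0 0], (-1 : Int), nums.getD 0 0)
    = ([nums.getD 0 0] ++ pvMid nums m, pvIdxF nums m, pvPmax nums m) := by
  induction m with
  | zero =>
    simp [pvMid, pvIdxF, pv_pmax_zero nums (by intro hc; rw [hc] at h; simp at h)]
  | succ m ih =>
    rw [List.range_succ, List.map_append, List.foldl_append, ih (by omega)]
    simp only [List.map_cons, List.map_nil, List.foldl_cons, List.foldl_nil]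
    have hcast : (1 : Int) + (m : Int) = ((m + 1 : Nat) : Int) := by push_cast; ring
    rw [hcast, PySem.List.pyGetD_natCast,
        pv_psum_get nums h (m+1) (by omega) (by omega)]
    have hmid := pv_mid_succ nums m
    by_cases hcond : nums.getD (m+1) 0 > pvPmax nums m ∨
        nums.getD (m+1) 0 > pvSmax nums (min (m+1+1) (nums.length - 1))
    · have hb : pvCond nums (m+1) = true := by
        simp only [pvCond, Nat.add_sub_cancel, Bool.or_eq_true, decide_eq_true_eq]
        exact hcond
      rw [if_pos hcond, hmid, hb]
      simp only [if_pos, pvIdxF, hb, pv_pmax_succ nums m (by omega)]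
      simp
    · have hb : pvCond nums (m+1) = false := by
        simp only [pvCond, Nat.add_sub_cancel, Bool.or_eq_false_iff, decide_eq_false_iff_not]
        rw [not_or] at hcond
        exact ⟨by omega, by omega⟩
      rw [if_neg hcond, hmid, hb]
      simp only [pvIdxF, hb, pv_pmax_succ nums m (by omega)]
      simp

-- A's normal form
theorem pv_A_nf (nums : List Int) (h : 3 ≤ nums.length) :
    findValidElements nums
    = nums.getD 0 0 :: (pvMid nums (nums.length - 2) ++ [nums.getD (nums.length - 1) 0]) := by
  have hne : nums ≠ [] := by intro hc; rw [hc] at h; simp at h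
  simp only [findValidElements]
  rw [if_neg (by omega)]
  rw [PySem.List.pyRange_neg_one, show ((nums.length : Int) - 2 - (-1)).toNat = nums.length - 1 by omega]
  rw [pv_last nums hne, PySem.List.pyGetD_zero]
  simp only [List.nil_append]
  rw [pv_loopA1 nums h (nums.length - 1) (le_refl _)]
  simp only
  rw [pv_psum_rev nums h]
  rw [PySem.List.pyRange_one, show ((nums.length : Int) - 1).toNat = nums.length - 1 by omega]
  rw [pv_loopA2 nums h (nums.length - 1) (le_refl _)]
  simp only
  have hsplit : nums.length - 1 = (nums.length - 2) + 1 := by omega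
  rw [hsplit, pv_mid_succ nums (nums.length - 2), pvIdxF]
  by_cases hb : pvCond nums (nums.length - 2 + 1) = true
  · rw [if_pos hb, if_pos hb]
    rw [if_neg (by push_cast; omega)]
    simp [← hsplit]
  · have hle := pv_idxF_le nums (nums.length - 2)
    rw [if_pos (by
          simp only [hb, if_false, Bool.false_eq_true]
          omega)]
    rw [if_neg (by simp [hb])]
    simp [← hsplit]

-- x strictly exceeds the max of a nonempty list iff it exceeds every element
theorem pv_gt_maxOf_iff (l : List Int) (x : Int) (h : l ≠ []) :
    pvMaxOf l < x ↔ ∀ y ∈ l, y < x := by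
  induction l with
  | nil => exact absurd rfl h
  | cons a t ih =>
    cases ht : t with
    | nil => simp [pvMaxOf]
    | cons b u =>
      rw [← ht, pv_maxOf_cons a t (by rw [ht]; simp), max_lt_iff, ih (by rw [ht]; simp)]
      simp

-- the element nums[b] sits in the window (take m).drop (a+1) when a < b < m ≤ n
theorem pv_mem_window (nums : List Int) (a b m : Nat)
    (hab : a < b) (hbm : b < m) (hmn : m ≤ nums.length) :
    nums.getD b 0 ∈ (nums.take m).drop (a+1) := by
  have hb : b < nums.length := by omega
  rw [List.mem_iff_getElem?]
  refine ⟨b - a - 1, ?_⟩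
  rw [List.getElem?_drop, show a + 1 + (b - a - 1) = b by omega,
      List.getElem?_take_of_lt (by omega), List.getElem?_eq_getElem hb,
      List.getD_eq_getElem?_getD, List.getElem?_eq_getElem hb]
  rfl

-- the stack is strictly decreasing in value from bottom to top
theorem pv_stack_sorted (nums : List Int) (m : Nat) (hm : m ≤ nums.length) :
    (pvStack nums m).Pairwise (fun a b => nums.getD b 0 < nums.getD a 0) := by
  have hlt : (pvStack nums m).Pairwise (· < ·) := List.pairwise_lt_range.filter _
  have hmem : ∀ j ∈ pvStack nums m, j < m ∧ pvRR nums m j = true := by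
    intro j hj
    rw [pvStack, List.mem_filter, List.mem_range] at hj
    exact hj
  refine List.Pairwise.imp_of_mem ?_ hlt
  intro a b ha hb hab
  obtain ⟨ham, haR⟩ := hmem a ha
  obtain ⟨hbm, _⟩ := hmem b hb
  rw [pvRR, List.all_eq_true] at haR
  have := haR _ (pv_mem_window nums a b m hab hbm hm)
  simpa using this

-- one step of the stack evolution
theorem pv_stack_succ (nums : List Int) (m : Nat) (hm : m < nums.length) :
    pvStack nums (m+1)
      = (pvStack nums m).filter (fun j => decide (nums.getD m 0 < nums.getD j 0)) ++ [m] := by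
  unfold pvStack
  rw [List.range_succ, List.filter_append]
  have htake : nums.take (m+1) = nums.take m ++ [nums[m]] := by
    rw [List.take_add_one, List.getElem?_eq_getElem hm]
    rfl
  congr 1
  · rw [List.filter_filter]
    apply List.filter_congr
    intro j hj
    rw [List.mem_range] at hj
    have hdrop : (nums.take (m+1)).drop (j+1) = (nums.take m).drop (j+1) ++ [nums[m]] := by
      rw [htake, List.drop_append_of_le_length (by rw [List.length_take]; omega)]
    simp only [pvRR, hdrop, List.all_append, List.all_cons, List.all_nil, Bool.and_true]
    rw [Bool.and_comm]
    congr 1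
    simp [List.getD_eq_getElem?_getD, List.getElem?_eq_getElem hm]
  · have : pvRR nums (m+1) m = true := by
      have : (nums.take (m+1)).drop (m+1) = [] := by
        apply List.drop_of_length_le
        rw [List.length_take]; omega
      simp [pvRR, this]
    simp [this]

-- the stack bottom is always the position of the running maximum
theorem pv_stack_bottom (nums : List Int) (m : Nat) (h1 : 1 ≤ m) (hm : m ≤ nums.length) :
    ∃ p, (pvStack nums m).head? = some p ∧ nums.getD p 0 = pvMaxOf (nums.take m) := by
  induction m with
  | zero => omega
  | succ m ih =>
    have htake : nums.take (m+1) = nums.take m ++ [nums[m]'(by omega)] := by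
      rw [List.take_add_one, List.getElem?_eq_getElem (by omega : m < nums.length)]
      rfl
    have hgd : nums[m]'(by omega) = nums.getD m 0 := by
      rw [List.getD_eq_getElem?_getD, List.getElem?_eq_getElem (by omega : m < nums.length)]
      rfl
    by_cases hm0 : m = 0
    · subst hm0
      have h01 : pvRR nums 1 0 = true := by
        have hd : (nums.take 1).drop 1 = [] := by
          apply List.drop_of_length_le
          rw [List.length_take]; omega
        simp [pvRR, hd]
      refine ⟨0, ?_, ?_⟩
      · simp [pvStack, List.range_succ, h01]
      · rw [htake]
        simp [pvMaxOf, hgd]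
    · obtain ⟨p, hp, hv⟩ := ih (by omega) (by omega)
      have hsucc := pv_stack_succ nums m (by omega)
      have hsorted := pv_stack_sorted nums m (by omega)
      obtain ⟨t, ht⟩ : ∃ t, pvStack nums m = p :: t := by
        cases hs : pvStack nums m with
        | nil => rw [hs] at hp; simp at hp
        | cons a u => rw [hs] at hp; simp at hp; exact ⟨u, by rw [hp]⟩
      have htne : nums.take m ≠ [] := by
        intro hc
        have := congrArg List.length hc
        rw [List.length_take, List.length_nil] at this
        omega
      have hmax : pvMaxOf (nums.take (m+1)) = max (pvMaxOf (nums.take m)) (nums.getD m 0) := by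
        rw [htake, pv_maxOf_append _ _ htne, hgd]
      by_cases hc : nums.getD m 0 < nums.getD p 0
      · refine ⟨p, ?_, ?_⟩
        · rw [hsucc, ht, List.filter_cons, if_pos (by simp only [decide_eq_true_eq]; exact hc)]
          rfl
        · rw [hmax, ← hv]
          exact (max_eq_left (by omega)).symm
      · have hfil : (pvStack nums m).filter (fun j => decide (nums.getD m 0 < nums.getD j 0)) = [] := by
          rw [List.filter_eq_nil_iff]
          intro j hj
          rw [ht] at hj hsorted
          rcases List.mem_cons.mp hj with hj0 | hjt
          · subst hj0; simpa using hc
          · have := List.rel_of_pairwise_cons hsorted hjt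
            simp only [decide_eq_true_eq]
            omega
        refine ⟨m, ?_, ?_⟩
        · rw [hsucc, hfil]
          rfl
        · rw [hmax, ← hv]
          exact (max_eq_right (by omega)).symm

-- the inner while loop pops a value-sorted stack down to the strictly larger elements
theorem pv_popWhile_eq_filter (nums : List Int) (x : Int) (l : List Int)
    (h : l.Pairwise (fun a b => PySem.List.pyGetD nums a 0 < PySem.List.pyGetD nums b 0)) :
    pvPopWhile nums x l = l.filter (fun j => decide (x < PySem.List.pyGetD nums j 0)) := by
  induction l with
  | nil => rfl
  | cons a t ih =>
    rw [List.pairwise_cons] at h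
    by_cases hc : PySem.List.pyGetD nums a 0 ≤ x
    · rw [pvPopWhile, if_pos hc, ih h.2, List.filter_cons]
      simp [show ¬ x < PySem.List.pyGetD nums a 0 by omega]
    · rw [pvPopWhile, if_neg hc, List.filter_cons]
      rw [if_pos (by simp; omega)]
      congr 1
      refine (List.filter_eq_self.mpr ?_).symm
      intro j hj
      have := h.1 j hj
      simp only [decide_eq_true_eq]
      omega

-- pvLR as a comparison against the prefix maximum
theorem pv_lr_iff (nums : List Int) (m : Nat) (h1 : 1 ≤ m) (hm : m ≤ nums.length) :
    pvLR nums m = decide (pvMaxOf (nums.take m) < nums.getD m 0) := by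
  have htne : nums.take m ≠ [] := by
    intro hc
    have := congrArg List.length hc
    rw [List.length_take, List.length_nil] at this
    omega
  rw [Bool.eq_iff_iff, decide_eq_true_eq, pv_gt_maxOf_iff _ _ htne]
  simp [pvLR]

-- B's main loop invariant: lrecs collects prefix records, the stack (top-first) the prefix's suffix records
theorem pv_loopB (nums : List Int) (m : Nat) (hm : m ≤ nums.length) :
    ((List.range m).map (fun (k : Nat) => ((k : Int), nums.getD k 0))).foldl
      (fun (st : List Int × List Int) (p : Int × Int) =>
        ((match st.2.getLast? with
          | none => st.1 ++ [p.1]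
          | some b => if PySem.List.pyGetD nums b 0 < p.2 then st.1 ++ [p.1] else st.1),
         p.1 :: pvPopWhile nums p.2 st.2))
      ([], [])
    = (((List.range m).filter (pvLR nums)).map (fun (k : Nat) => (k : Int)),
       (pvStack nums m).reverse.map (fun (k : Nat) => (k : Int))) := by
  induction m with
  | zero => simp [pvStack]
  | succ m ih =>
    rw [List.range_succ, List.map_append, List.foldl_append, ih (by omega)]
    simp only [List.map_cons, List.map_nil, List.foldl_cons, List.foldl_nil]
    have hrev : (pvStack nums m).reverse.map (fun k => ((k : Nat) : Int))
        = ((pvStack nums m).map (fun k => ((k : Nat) : Int))).reverse := by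
      rw [List.map_reverse]
    have hsorted := pv_stack_sorted nums m (by omega)
    have hpw : ((pvStack nums m).reverse.map (fun k => ((k : Nat) : Int))).Pairwise
        (fun a b => PySem.List.pyGetD nums a 0 < PySem.List.pyGetD nums b 0) := by
      rw [List.pairwise_map, List.pairwise_reverse]
      refine hsorted.imp_of_mem ?_
      intro a b _ _ hab
      simp only [PySem.List.pyGetD_natCast]
      exact hab
    have hpop : pvPopWhile nums (nums.getD m 0) ((pvStack nums m).reverse.map (fun k => ((k : Nat) : Int)))
        = ((pvStack nums m).filter (fun j => decide (nums.getD m 0 < nums.getD j 0))).reverse.map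
            (fun k => ((k : Nat) : Int)) := by
      rw [pv_popWhile_eq_filter nums _ _ hpw, List.filter_map, List.filter_reverse]
      congr 1
      congr 1
      apply List.filter_congr
      intro j _
      simp
    have hstk : ((m : Nat) : Int) :: pvPopWhile nums (nums.getD m 0)
          ((pvStack nums m).reverse.map (fun k => ((k : Nat) : Int)))
        = (pvStack nums (m+1)).reverse.map (fun k => ((k : Nat) : Int)) := by
      rw [hpop, pv_stack_succ nums m (by omega), List.reverse_append]
      rfl
    have hlrecs : (match ((pvStack nums m).reverse.map (fun k => ((k : Nat) : Int))).getLast? with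
          | none => (((List.range m).filter (pvLR nums)).map (fun k => ((k : Nat) : Int))) ++ [((m : Nat) : Int)]
          | some b => if PySem.List.pyGetD nums b 0 < nums.getD m 0
              then (((List.range m).filter (pvLR nums)).map (fun k => ((k : Nat) : Int))) ++ [((m : Nat) : Int)]
              else (((List.range m).filter (pvLR nums)).map (fun k => ((k : Nat) : Int))))
        = ((List.range m ++ [m]).filter (pvLR nums)).map (fun k => ((k : Nat) : Int)) := by
      by_cases hm0 : m = 0
      · subst hm0
        have hLR0 : pvLR nums 0 = true := by simp [pvLR]
        simp [pvStack, hLR0]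
      · obtain ⟨p, hp, hv⟩ := pv_stack_bottom nums m (by omega) (by omega)
        have hglast : ((pvStack nums m).reverse.map (fun k => ((k : Nat) : Int))).getLast?
            = some ((p : Nat) : Int) := by
          rw [hrev, List.getLast?_reverse, List.head?_map, hp]
          rfl
        rw [hglast]
        simp only [PySem.List.pyGetD_natCast]
        rw [List.filter_append, List.map_append]
        by_cases hc : nums.getD p 0 < nums.getD m 0
        · rw [if_pos hc]
          have hLR : pvLR nums m = true := by
            rw [pv_lr_iff nums m (by omega) (by omega), ← hv]
            simpa using hc
          simp [hLR]
        · rw [if_neg hc]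
          have hLR : pvLR nums m = false := by
            rw [pv_lr_iff nums m (by omega) (by omega), ← hv]
            simpa using hc
          simp [hLR]
    rw [Prod.mk.injEq]
    exact ⟨hlrecs, hstk⟩

-- membership in the final keep set, for an index k < n
theorem pv_keep_iff (nums : List Int) (h : 3 ≤ nums.length) (k : Nat) (hk : k < nums.length) :
    ((k : Int) = 0 ∨ (k : Int) = (nums.length : Int) - 1 ∨
      (k : Int) ∈ ((List.range nums.length).filter (pvLR nums)).map (fun j => ((j : Nat) : Int)) ∨
      (k : Int) ∈ ((pvStack nums nums.length).reverse.map (fun j => ((j : Nat) : Int))).reverse)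
    ↔ (k = 0 ∨ k = nums.length - 1 ∨ pvCond nums k = true) := by
  have hmemL : (k : Int) ∈ ((List.range nums.length).filter (pvLR nums)).map (fun j => ((j : Nat) : Int))
      ↔ pvLR nums k = true := by
    rw [List.mem_map]
    constructor
    · rintro ⟨j, hj, hje⟩
      rw [List.mem_filter] at hj
      have : j = k := by exact_mod_cast hje
      rw [← this]; exact hj.2
    · intro hlr
      exact ⟨k, List.mem_filter.mpr ⟨List.mem_range.mpr hk, hlr⟩, rfl⟩
  have hmemR : (k : Int) ∈ ((pvStack nums nums.length).reverse.map (fun j => ((j : Nat) : Int))).reverse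
      ↔ pvRR nums nums.length k = true := by
    rw [List.mem_reverse, List.mem_map]
    constructor
    · rintro ⟨j, hj, hje⟩
      rw [List.mem_reverse, pvStack, List.mem_filter] at hj
      have : j = k := by exact_mod_cast hje
      rw [← this]; exact hj.2
    · intro hrr
      exact ⟨k, List.mem_reverse.mpr (List.mem_filter.mpr ⟨List.mem_range.mpr hk, hrr⟩), rfl⟩
  rw [hmemL, hmemR]
  constructor
  · rintro (h0 | hl | hlr | hrr)
    · exact Or.inl (by exact_mod_cast h0)
    · exact Or.inr (Or.inl (by omega))
    · -- a prefix record: if not an endpoint, the first disjunct of pvCond fires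
      by_cases hk0 : k = 0
      · exact Or.inl hk0
      · refine Or.inr (Or.inr ?_)
        rw [pv_lr_iff nums k (by omega) (by omega)] at hlr
        have : pvMaxOf (nums.take k) < nums.getD k 0 := by simpa using hlr
        simp only [pvCond, Bool.or_eq_true, decide_eq_true_eq]
        left
        rw [pvPmax, show k - 1 + 1 = k by omega]
        omega
    · -- a suffix record: if not an endpoint, the second disjunct of pvCond fires
      by_cases hkl : k = nums.length - 1
      · exact Or.inr (Or.inl hkl)
      · refine Or.inr (Or.inr ?_)
        rw [pvRR, List.take_length, List.all_eq_true] at hrr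
        have hne : nums.drop (k+1) ≠ [] := by
          intro hc
          have := congrArg List.length hc
          rw [List.length_drop, List.length_nil] at this
          omega
        have : pvMaxOf (nums.drop (k+1)) < nums.getD k 0 := by
          rw [pv_gt_maxOf_iff _ _ hne]
          intro y hy
          simpa using hrr y hy
        simp only [pvCond, Bool.or_eq_true, decide_eq_true_eq]
        right
        rw [pvSmax, show min (k+1) (nums.length - 1) = k + 1 by omega]
        omega
  · rintro (h0 | hl | hcond)
    · exact Or.inl (by exact_mod_cast congrArg (fun x => ((x : Nat) : Int)) h0)
    · refine Or.inr (Or.inl ?_)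
      rw [hl]
      push_cast [Nat.cast_sub (by omega : 1 ≤ nums.length)]
      ring
    · simp only [pvCond, Bool.or_eq_true, decide_eq_true_eq] at hcond
      rcases hcond with hc1 | hc2
      · -- exceeds the prefix max
        by_cases hk0 : k = 0
        · exact Or.inl (by simp [hk0])
        · refine Or.inr (Or.inr (Or.inl ?_))
          rw [pv_lr_iff nums k (by omega) (by omega)]
          rw [pvPmax, show k - 1 + 1 = k by omega] at hc1
          simpa using hc1
      · -- exceeds the suffix max
        by_cases hkl : k = nums.length - 1
        · exact Or.inr (Or.inl (by
            rw [hkl]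
            push_cast [Nat.cast_sub (by omega : 1 ≤ nums.length)]
            ring))
        · refine Or.inr (Or.inr (Or.inr ?_))
          rw [pvSmax, show min (k+1) (nums.length - 1) = k + 1 by omega] at hc2
          have hne : nums.drop (k+1) ≠ [] := by
            intro hc
            have := congrArg List.length hc
            rw [List.length_drop] at this
            simp at this; omega
          rw [pvRR, List.take_length, List.all_eq_true]
          intro y hy
          have := (pv_gt_maxOf_iff _ _ hne).mp (by omega) y hy
          simpa using this

-- map-after-filter as a filterMap
theorem pv_map_filter {α β : Type} (q : α → Bool) (f : α → β) (l : List α) :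
    (l.filter q).map f = l.filterMap (fun a => if q a then some (f a) else none) := by
  induction l with
  | nil => rfl
  | cons a l ih =>
    by_cases hq : q a = true <;> simp [hq, ih]

-- B's normal form
theorem pv_B_nf (nums : List Int) (h : 3 ≤ nums.length) :
    findValidElements_alt nums
    = nums.getD 0 0 :: (pvMid nums (nums.length - 2) ++ [nums.getD (nums.length - 1) 0]) := by
  simp only [findValidElements_alt]
  rw [if_neg (by omega)]
  rw [show PySem.List.enumerate nums
        = ((List.range nums.length).map (fun (k : Nat) => ((k : Int), nums.getD k 0))) by
      rw [PySem.List.enumerate_eq_map_pyRange (d := 0), PySem.List.pyRange_one]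
      simp only [Int.sub_zero, PySem.List.len, Int.toNat_natCast, List.map_map]
      apply List.map_congr_left
      intro k _
      simp]
  rw [pv_loopB nums nums.length (le_refl _)]
  simp only
  rw [PySem.List.pyRange_one 0 (nums.length : Int),
      show ((nums.length : Int) - 0).toNat = nums.length by omega]
  rw [show (List.range nums.length).map (fun k => (0 : Int) + (k : Nat))
        = (List.range nums.length).map (fun k => ((k : Nat) : Int)) by
      apply List.map_congr_left; intro k _; omega]
  rw [PySem.List.foldl_append_if]
  rw [List.filter_map, List.map_map, pv_map_filter, List.nil_append]
  rw [List.filterMap_congr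
        (g := fun k => if k = 0 ∨ k = nums.length - 1 ∨ pvCond nums k then some (nums.getD k 0) else none)
        ?_]
  · rw [show List.range nums.length = 0 :: List.map Nat.succ (List.range (nums.length - 1)) by
          rw [← List.range_succ_eq_map]; congr 1; omega]
    rw [show List.range (nums.length - 1) = List.range (nums.length - 2) ++ [nums.length - 2] by
          rw [← List.range_succ]; congr 1; omega]
    rw [List.filterMap_cons, List.map_append, List.filterMap_append, List.filterMap_map]
    rw [if_pos (Or.inl rfl)]
    rw [List.filterMap_congr
          (g := fun k => if pvCond nums (k+1) then some (nums.getD (k+1) 0) else none) ?_]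
    · simp only [List.map_cons, List.map_nil, List.filterMap_cons, List.filterMap_nil]
      rw [if_pos (Or.inr (Or.inl (by omega)))]
      rw [show Nat.succ (nums.length - 2) = nums.length - 1 by omega]
      simp [pvMid]
    · intro k hk
      rw [List.mem_range] at hk
      simp only [Function.comp_apply]
      refine if_congr ?_ rfl rfl
      constructor
      · rintro (hx | hx | hx)
        · omega
        · omega
        · exact hx
      · intro hx
        exact Or.inr (Or.inr hx)
  · intro k hk
    rw [List.mem_range] at hk
    simp only [Function.comp_apply]
    have hcontains :
        (PySem.Set.contains
          (PySem.Set.ofList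
            ([0, (nums.length : Int) - 1]
              ++ ((List.range nums.length).filter (pvLR nums)).map (fun j => ((j : Nat) : Int))
              ++ ((pvStack nums nums.length).reverse.map (fun j => ((j : Nat) : Int))).reverse))
          ((k : Nat) : Int) = true)
        ↔ (k = 0 ∨ k = nums.length - 1 ∨ pvCond nums k = true) := by
      rw [PySem.Set.contains_iff, PySem.Set.mem_ofList]
      rw [← pv_keep_iff nums h k hk]
      simp only [List.append_assoc, List.mem_append, List.mem_cons]
      tauto
    by_cases hc : k = 0 ∨ k = nums.length - 1 ∨ pvCond nums k = true
    · rw [if_pos (hcontains.mpr hc), if_pos hc, PySem.List.pyGetD_natCast]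
    · rw [if_neg (by rw [hcontains]; exact hc), if_neg hc]

-- ===== VERDICT (by name: the statement is the Claim_ definition above) =====
theorem findValidElements_spec : Claim_equal_findValidElements := by
  intro nums _
  unfold Spec_findValidElements
  by_cases h : 3 ≤ nums.length
  · rw [pv_A_nf nums h, pv_B_nf nums h]
  · unfold findValidElements findValidElements_alt
    rw [if_pos (by omega), if_pos (by omega)]
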